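-- pv_equiv track=rewrite | github.com/teewhymagg/AI_programming | 03-reinforcement_learning/menace_ds/menace_ds_train.py | get_weight_id
-- ===== SOURCE A (Python) =====
-- def get_weight_id(state, cell_on_state):
--     weight_ids = 0
--     weight_ids_dict = {}
--     for i, cell in enumerate(state):
--         if cell == "_":
--             weight_ids_dict[i] = weight_ids
--             weight_ids += 1
--     return weight_ids_dict[cell_on_state]
-- ===== SOURCE B (Python) =====
-- def get_weight_id(state, cell_on_state):
--     if 0 <= cell_on_state < len(state) and state[cell_on_state] == "_":
--         return state[:cell_on_state].count("_")
--     raise KeyError(cell_on_state)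
-- ===== Notes on version B (the rewrite author's own statement) =====
-- stated objective: simpler
-- what changed: Drops the dict-building loop entirely: the id of the empty cell at an index is just the number of '_' characters before that index, so B validates the target cell and returns a prefix count (raising KeyError exactly where A's dict lookup fails).
import Mathlib
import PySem

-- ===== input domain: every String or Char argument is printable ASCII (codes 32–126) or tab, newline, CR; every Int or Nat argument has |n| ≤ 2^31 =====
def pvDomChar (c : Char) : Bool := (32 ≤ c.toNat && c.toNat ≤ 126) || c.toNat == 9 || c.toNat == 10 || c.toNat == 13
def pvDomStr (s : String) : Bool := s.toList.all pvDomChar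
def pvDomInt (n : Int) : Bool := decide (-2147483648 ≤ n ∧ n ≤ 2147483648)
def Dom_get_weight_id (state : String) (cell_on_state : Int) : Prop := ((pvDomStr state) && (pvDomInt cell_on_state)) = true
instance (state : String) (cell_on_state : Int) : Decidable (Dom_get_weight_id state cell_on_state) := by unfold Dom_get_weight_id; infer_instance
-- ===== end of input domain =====

-- B drops A's dict-building loop: the id of the '_' cell at an index is the number of '_' before it,
-- so B validates the target cell and returns a prefix count (simpler; equivalence proved on Pre_ = inputs where A returns).


-- ===== PORT A =====
-- literal port: enumerate state, record dict[i] = running counter at each '_', then look the target up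
-- (the KeyError of a failed lookup is excluded by Pre_; the .getD 0 is never reached there)
def get_weight_id (state : String) (cell_on_state : Int) : Int :=
  ((((PySem.List.enumerate state.toList 0).foldl
      (fun (acc : Int × PySem.Dict Int Int) ic =>
        if ic.2 == '_' then (acc.1 + 1, acc.2.insert ic.1 acc.1) else acc)
      (0, PySem.Dict.empty)).2.get? cell_on_state).getD 0)

-- ===== PORT B =====
-- literal port of Source B; state[:c].count("_") with a one-char pattern is exactly the char count of the slice;
-- the KeyError branch (excluded by Pre_) is represented by 0
def get_weight_id_alt (state : String) (cell_on_state : Int) : Int :=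
  if 0 ≤ cell_on_state ∧ cell_on_state < (state.toList.length : Int) ∧
      state.toList[cell_on_state.toNat]? = some '_' then
    ((PySem.List.slice state.toList none (some cell_on_state)).count '_' : Int)
  else 0

-- ===== PRECONDITION & SPEC =====
-- Pre_ = exactly the inputs where A's dict lookup succeeds (KeyError otherwise):
-- cell_on_state is an in-range index of an '_' cell
def Pre_get_weight_id (state : String) (cell_on_state : Int) : Prop :=
  0 ≤ cell_on_state ∧ cell_on_state < (state.toList.length : Int) ∧
    state.toList[cell_on_state.toNat]? = some '_'
instance (state : String) (cell_on_state : Int) : Decidable (Pre_get_weight_id state cell_on_state) := by unfold Pre_get_weight_id; infer_instance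
def pvWitness_get_weight_id : String × Int := ("X_O", 1)
def Spec_get_weight_id (state : String) (cell_on_state : Int) (out : Int) : Prop := out = get_weight_id_alt state cell_on_state
instance (state : String) (cell_on_state : Int) (out : Int) : Decidable (Spec_get_weight_id state cell_on_state out) := by unfold Spec_get_weight_id; infer_instance

-- ===== CLAIM (what is proved, stated in full; the proofs are below) =====
def Claim_equal_get_weight_id : Prop := ∀ (state : String) (cell_on_state : Int), Dom_get_weight_id state cell_on_state → Pre_get_weight_id state cell_on_state → Spec_get_weight_id state cell_on_state (get_weight_id state cell_on_state)

-- ===== LEMMAS AND PROOFS =====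

-- The final dict of A's loop, looked up at c: some (w₀ + #'_' in the prefix before c) when c indexes an '_',
-- otherwise whatever the initial dict had at c.
lemma foldA_get?
    (cs : List Char) : ∀ (s : Int) (w : Int) (d : PySem.Dict Int Int) (c : Int),
    ((PySem.List.enumerate cs s).foldl
      (fun (acc : Int × PySem.Dict Int Int) ic =>
        if ic.2 == '_' then (acc.1 + 1, acc.2.insert ic.1 acc.1) else acc)
      (w, d)).2.get? c
    = if 0 ≤ c - s ∧ c - s < (cs.length : Int) ∧ cs[(c - s).toNat]? = some '_'
      then some (w + (((cs.take (c - s).toNat).count '_' : Nat) : Int))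
      else d.get? c := by
  induction cs with
  | nil =>
    intro s w d c
    simp [PySem.List.enumerate_nil]
  | cons x cs ih =>
    intro s w d c
    rw [PySem.List.enumerate_cons, List.foldl_cons]
    by_cases hx : x = '_'
    · subst hx
      simp only [beq_self_eq_true, if_true]
      rw [ih (s + 1) (w + 1) (d.insert s w) c]
      by_cases hcs : c = s
      · have h1 : ¬ (0 ≤ c - (s + 1)) := by omega
        rw [if_neg (fun h => h1 h.1), hcs, PySem.Dict.get?_insert_self,
            if_pos ⟨by omega, by simp only [List.length_cons]; push_cast; omega, by simp⟩]
        simp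
      · by_cases hgt : s < c
        · have ht : (c - s).toNat = (c - (s + 1)).toNat + 1 := by omega
          have hlen : (c - s < ((cs.length : Int) + 1)) ↔ (c - (s+1) < (cs.length : Int)) := by omega
          have h0 : 0 ≤ c - s := by omega
          have h0' : 0 ≤ c - (s+1) := by omega
          simp only [ht, List.getElem?_cons_succ, List.take_succ_cons, List.count_cons,
            List.length_cons]
          by_cases hc2 : 0 ≤ c - (s+1) ∧ c - (s+1) < (cs.length : Int) ∧ cs[(c - (s+1)).toNat]? = some '_'
          · obtain ⟨a1, a2, a3⟩ := hc2
            have : (c - (s+1)).toNat = (c - s).toNat - 1 := by omega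
            rw [if_pos ⟨a1, a2, a3⟩, if_pos ⟨h0, by push_cast; omega, a3⟩]
            simp
            omega
          · rw [if_neg hc2, if_neg (by
              intro ⟨b1, b2, b3⟩
              exact hc2 ⟨h0', by push_cast at b2 ⊢; omega, b3⟩)]
            exact PySem.Dict.get?_insert_of_ne d w hcs
        · -- c < s : всё false on both sides
          have h1 : ¬ (0 ≤ c - (s+1)) := by omega
          have h2 : ¬ (0 ≤ c - s) := by omega
          rw [if_neg (by intro h; exact h1 h.1), if_neg (by intro h; exact h2 h.1)]
          exact PySem.Dict.get?_insert_of_ne d w hcs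
    · have hbeq : (x == '_') = false := by simp [hx]
      simp only [hbeq, Bool.false_eq_true, if_false]
      rw [ih (s + 1) w d c]
      by_cases hcs : c = s
      · have h1 : ¬ (0 ≤ c - (s + 1)) := by omega
        rw [if_neg (fun h => h1 h.1), if_neg (by
          rintro ⟨b1, b2, b3⟩
          rw [show (c - s).toNat = 0 by omega] at b3
          simp at b3
          exact hx b3)]
      · by_cases hgt : s < c
        · have ht : (c - s).toNat = (c - (s + 1)).toNat + 1 := by omega
          have h0 : 0 ≤ c - s := by omega
          have h0' : 0 ≤ c - (s+1) := by omega
          simp only [ht, List.getElem?_cons_succ, List.take_succ_cons, List.count_cons,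
            List.length_cons]
          by_cases hc2 : 0 ≤ c - (s+1) ∧ c - (s+1) < (cs.length : Int) ∧ cs[(c - (s+1)).toNat]? = some '_'
          · obtain ⟨a1, a2, a3⟩ := hc2
            rw [if_pos ⟨a1, a2, a3⟩, if_pos ⟨h0, by push_cast; omega, a3⟩]
            simp [hbeq]
          · rw [if_neg hc2, if_neg (by
              intro ⟨b1, b2, b3⟩
              exact hc2 ⟨h0', by push_cast at b2 ⊢; omega, b3⟩)]
        · have h1 : ¬ (0 ≤ c - (s+1)) := by omega
          have h2 : ¬ (0 ≤ c - s) := by omega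
          rw [if_neg (by intro h; exact h1 h.1), if_neg (by intro h; exact h2 h.1)]

-- ===== VERDICT (by name: the statement is the Claim_ definition above) =====
theorem get_weight_id_spec : Claim_equal_get_weight_id := by
  intro state c _hDom hPre
  obtain ⟨h0, hlt, hget⟩ := hPre
  unfold Spec_get_weight_id get_weight_id get_weight_id_alt
  rw [foldA_get? state.toList 0 0 PySem.Dict.empty c]
  have hsub : c - 0 = c := by omega
  rw [if_pos (by rw [hsub]; exact ⟨h0, hlt, hget⟩),
      if_pos ⟨h0, hlt, hget⟩, PySem.List.slice_to state.toList h0]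
  simp [hsub]
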